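-- pv_equiv track=rewrite | github.com/thehvshah97/Leetcode | String/ValidWordAbbreviation.py | validWord
-- ===== SOURCE A (Python) =====
-- def validWord(word: str, abbr: str) -> bool:
--     if len(word) < len(abbr):
--         return False
--     abbr_index = 0
--     word_index = 0
--     while abbr_index < len(abbr):
--         char = abbr[abbr_index]
--         if char.isnumeric():
--             if char == '0':
--                 return False
--             else:
--                 num = 0
--                 while abbr_index < len(abbr) and abbr[abbr_index].isnumeric():
--                     num = num * 10 + int(abbr[abbr_index])
--                     abbr_index += 1
--
--                 word_index += num
--         else:
--             if word_index >= len(word) or word[word_index] != char: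
--                 return False
--             abbr_index += 1
--             word_index += 1
--     return word_index == len(word)
-- ===== SOURCE B (Python) =====
-- def validWord(word: str, abbr: str) -> bool:
--     if len(word) < len(abbr):
--         return False
--     # walk over suffixes of both strings; an empty abbr must leave an empty word
--     while abbr:
--         c = abbr[0]
--         if c.isdigit():
--             if c == '0':
--                 return False
--             k = 1
--             while k < len(abbr) and abbr[k].isdigit():
--                 k += 1
--             n = 0
--             for d in abbr[:k]:
--                 n = 10 * n + (ord(d) - 48)
--             if n > len(word):
--                 return False
--             word = word[n:]
--             abbr = abbr[k:]
--         else: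
--             if not word or word[0] != c:
--                 return False
--             word = word[1:]
--             abbr = abbr[1:]
--     return not word
-- ===== Notes on version B (the rewrite author's own statement) =====
-- stated objective: alternative
-- what changed: Replaces A's two-index while loop (abbr_index/word_index with an inner digit-accumulating while and a final word_index==len check) by a loop over suffixes of both strings: each step slices word[n:]/abbr[k:], rejects up front when the skip count exceeds the remaining word, and ends by testing that the word suffix is empty.
import Mathlib
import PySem

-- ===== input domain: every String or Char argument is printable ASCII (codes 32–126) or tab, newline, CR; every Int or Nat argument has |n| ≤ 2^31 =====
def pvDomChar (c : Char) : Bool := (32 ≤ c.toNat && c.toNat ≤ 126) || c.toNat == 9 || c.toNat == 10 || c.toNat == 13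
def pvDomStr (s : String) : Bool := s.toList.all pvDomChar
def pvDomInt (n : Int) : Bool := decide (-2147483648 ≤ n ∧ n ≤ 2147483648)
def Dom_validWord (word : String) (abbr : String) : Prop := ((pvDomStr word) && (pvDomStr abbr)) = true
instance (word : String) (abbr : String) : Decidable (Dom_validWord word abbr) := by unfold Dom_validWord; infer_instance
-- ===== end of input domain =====

-- B re-implements A's two-index walk as a loop over string suffixes (slices), checking the skip count up front; same return value, no speed claim.

-- ===== PORT A =====
-- A-side helper: the inner `while … isnumeric()` loop accumulating num and advancing abbr_index,
-- as a recursion over the remaining abbr characters.  `char.isnumeric()` is ported as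
-- PySem.Chars.isdigit (equal on the ASCII input domain); `int(abbr[abbr_index])` on a single
-- digit character is ported exactly as (c.toNat - 48 : Int).
def takeNumA : List Char → Int → Int × List Char
  | [], num => (num, [])
  | c :: r, num =>
    if PySem.Chars.isdigit c then takeNumA r (num * 10 + ((c.toNat : Int) - 48))
    else (num, c :: r)

theorem takeNumA_len_le : ∀ (l : List Char) (m : Int), (takeNumA l m).2.length ≤ l.length := by
  intro l
  induction l with
  | nil => intro m; simp [takeNumA]
  | cons c r ih =>
    intro m
    simp only [takeNumA]
    split
    · exact Nat.le_trans (ih _) (Nat.le_succ _)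
    · simp

-- A's outer while loop: state = remaining abbr characters and word_index.
def loopA (word : List Char) : List Char → Int → Bool
  | [], wi => wi == (word.length : Int)
  | c :: rest, wi =>
    if PySem.Chars.isdigit c then
      if c == '0' then false
      else
        let p := takeNumA (c :: rest) 0
        loopA word p.2 (wi + p.1)
    else
      if wi ≥ (word.length : Int) || !(PySem.List.pyGet? word wi == some c) then false
      else loopA word rest (wi + 1)
termination_by a _ => a.length
decreasing_by
  · have h := takeNumA_len_le rest (0 * 10 + ((c.toNat : Int) - 48))
    simp only [takeNumA, *, if_pos, List.length_cons] at *
    omega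
  · simp

def validWord (word : String) (abbr : String) : Bool :=
  if word.toList.length < abbr.toList.length then false
  else loopA word.toList abbr.toList 0

-- ===== PORT B =====
-- B-side helper: the `while k < len(abbr) and abbr[k].isdigit(): k += 1` loop of Source B,
-- counting the leading digit characters.
def countB : List Char → Nat
  | [] => 0
  | c :: r => if PySem.Chars.isdigit c then countB r + 1 else 0

-- Source B's suffix loop as a structural recursion on the abbr suffix (the loop state); `ord(d) - 48` is (d.toNat - 48 : Int),
-- `word[n:]` with 0 ≤ n is List.drop n.toNat.
def matchB : List Char → List Char → Bool
  | w, [] => w.isEmpty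
  | w, c :: rest =>
    if PySem.Chars.isdigit c then
      if c == '0' then false
      else
        let k := 1 + countB rest
        let n := ((c :: rest).take k).foldl (fun acc d => 10 * acc + ((d.toNat : Int) - 48)) 0
        decide (n ≤ (w.length : Int)) && matchB (w.drop n.toNat) ((c :: rest).drop k)
    else
      (!w.isEmpty) && (w.headD ' ' == c) && matchB (w.drop 1) rest
termination_by _ a => a.length
decreasing_by
  · simp
  · simp

def validWord_alt (word : String) (abbr : String) : Bool :=
  if word.toList.length < abbr.toList.length then false
  else matchB word.toList abbr.toList

-- ===== PRECONDITION & SPEC =====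
def Spec_validWord (word : String) (abbr : String) (out : Bool) : Prop := out = validWord_alt word abbr
instance (word : String) (abbr : String) (out : Bool) : Decidable (Spec_validWord word abbr out) := by unfold Spec_validWord; infer_instance

-- ===== CLAIM (what is proved, stated in full; the proofs are below) =====
def Claim_equal_validWord : Prop := ∀ (word : String) (abbr : String), Dom_validWord word abbr → Spec_validWord word abbr (validWord word abbr)

-- ===== LEMMAS AND PROOFS =====

-- takeNumA is Horner over the leading digit run, leaving the rest.
theorem takeNumA_eq (l : List Char) : ∀ (m : Int),
    takeNumA l m = ((l.takeWhile PySem.Chars.isdigit).foldl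
        (fun acc d => 10 * acc + ((d.toNat : Int) - 48)) m,
      l.dropWhile PySem.Chars.isdigit) := by
  induction l with
  | nil => intro m; simp [takeNumA]
  | cons c r ih =>
    intro m
    by_cases h : PySem.Chars.isdigit c
    · simp [takeNumA, h, List.takeWhile_cons, List.dropWhile_cons, ih, mul_comm]
    · simp [takeNumA, h, List.takeWhile_cons, List.dropWhile_cons]

theorem isdigit_ge (c : Char) (h : PySem.Chars.isdigit c = true) : 48 ≤ c.toNat := by
  simp [PySem.Chars.isdigit] at h
  exact h.1

theorem horner_nonneg (l : List Char) : ∀ (m : Int), (∀ d ∈ l, PySem.Chars.isdigit d = true) →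
    0 ≤ m → 0 ≤ l.foldl (fun acc d => 10 * acc + ((d.toNat : Int) - 48)) m := by
  induction l with
  | nil => intro m _ hm; simpa using hm
  | cons c r ih =>
    intro m hall hm
    simp only [List.foldl_cons]
    refine ih _ (fun d hd => hall d (List.mem_cons_of_mem _ hd)) ?_
    have := isdigit_ge c (hall c List.mem_cons_self)
    have : (48 : Int) ≤ (c.toNat : Int) := by exact_mod_cast this
    nlinarith

-- take/drop at the digit count = takeWhile/dropWhile on digits.
theorem take_countB (l : List Char) : l.take (countB l) = l.takeWhile PySem.Chars.isdigit := by
  induction l with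
  | nil => simp [countB]
  | cons c r ih =>
    by_cases h : PySem.Chars.isdigit c
    · simp [countB, h, List.takeWhile_cons_of_pos, ih]
    · simp [countB, h, List.takeWhile_cons]

theorem drop_countB (l : List Char) : l.drop (countB l) = l.dropWhile PySem.Chars.isdigit := by
  induction l with
  | nil => simp [countB]
  | cons c r ih =>
    by_cases h : PySem.Chars.isdigit c
    · simp [countB, h, List.dropWhile_cons, ih]
    · simp [countB, h, List.dropWhile_cons]

-- The number B reads off the digit run is exactly A's accumulated num, and both leave the same rest.
theorem num_eq (c : Char) (r : List Char) (hd : PySem.Chars.isdigit c = true) :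
    takeNumA (c :: r) 0 =
      (((c :: r).take (1 + countB r)).foldl (fun acc d => 10 * acc + ((d.toNat : Int) - 48)) 0,
        (c :: r).drop (1 + countB r)) := by
  have h1 : (c :: r).take (1 + countB r) = (c :: r).takeWhile PySem.Chars.isdigit := by
    rw [List.takeWhile_cons_of_pos hd, Nat.add_comm, List.take_succ_cons, take_countB]
  have h2 : (c :: r).drop (1 + countB r) = (c :: r).dropWhile PySem.Chars.isdigit := by
    rw [List.dropWhile_cons_of_pos hd, Nat.add_comm, List.drop_succ_cons, drop_countB]
  rw [takeNumA_eq, h1, h2]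

theorem takeNum_nonneg (c : Char) (r : List Char) : 0 ≤ (takeNumA (c :: r) 0).1 := by
  rw [takeNumA_eq]
  exact horner_nonneg _ 0 (fun d hd => List.mem_takeWhile_imp hd) le_rfl

-- When the word index has run past the word, the rest of A's loop can only return false.
theorem loopA_false (word : List Char) : ∀ (a : List Char) (wi : Int),
    (word.length : Int) < wi → loopA word a wi = false := by
  intro a wi
  induction a, wi using loopA.induct word with
  | case1 wi => intro h; simp only [loopA, beq_eq_false_iff_ne, ne_eq]; omega
  | case2 c r wi hd h0 =>
    intro _
    rw [loopA, if_pos hd, if_pos h0]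
  | case3 c r wi hd h0 p ih =>
    intro h
    have hpv : p = takeNumA (c :: r) 0 := rfl
    have hnn := takeNum_nonneg c r
    have hA : loopA word (c :: r) wi = loopA word (takeNumA (c :: r) 0).2 (wi + (takeNumA (c :: r) 0).1) := by
      rw [loopA, if_pos hd, if_neg h0]
    rw [hA]
    rw [hpv] at ih
    exact ih (by omega)
  | case4 c r wi hd hfail =>
    intro _
    rw [loopA, if_neg (by simpa using hd), if_pos hfail]
  | case5 c r wi hd hfail ih =>
    intro h
    exfalso
    simp only [Bool.or_eq_true, decide_eq_true_eq, ge_iff_le] at hfail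
    push_neg at hfail
    omega

-- Core invariant: A's loop from word_index wi equals B's match on the wi-suffix of the word.
theorem loop_eq_match (word : List Char) : ∀ (a : List Char) (wi : Int),
    0 ≤ wi → wi ≤ (word.length : Int) →
    loopA word a wi = matchB (word.drop wi.toNat) a := by
  intro a wi
  induction a, wi using loopA.induct word with
  | case1 wi =>
    intro h0 h1
    rw [loopA, matchB, Bool.eq_iff_iff]
    simp only [beq_iff_eq, List.isEmpty_iff, List.drop_eq_nil_iff]
    omega
  | case2 c r wi hd h0 =>
    intro _ _
    rw [loopA, if_pos hd, if_pos h0, matchB, if_pos hd, if_pos h0]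
  | case3 c r wi hd h0 p ih =>
    intro hnn hle
    have hpv : p = takeNumA (c :: r) 0 := rfl
    rw [hpv] at ih
    have hA : loopA word (c :: r) wi = loopA word (takeNumA (c :: r) 0).2 (wi + (takeNumA (c :: r) 0).1) := by
      rw [loopA, if_pos hd, if_neg h0]
    have hq := num_eq c r hd
    set k := 1 + countB r with hk
    set n := ((c :: r).take k).foldl (fun acc d => 10 * acc + ((d.toNat : Int) - 48)) 0 with hn
    have hp1 : (takeNumA (c :: r) 0).1 = n := by rw [hq]
    have hp2 : (takeNumA (c :: r) 0).2 = (c :: r).drop k := by rw [hq]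
    have hnpos : 0 ≤ n := by rw [← hp1]; exact takeNum_nonneg c r
    have hB : matchB (word.drop wi.toNat) (c :: r) =
        (decide (n ≤ ((word.drop wi.toNat).length : Int)) &&
          matchB ((word.drop wi.toNat).drop n.toNat) ((c :: r).drop k)) := by
      rw [matchB, if_pos hd, if_neg h0]
    rw [hA, hB]
    rw [hp1, hp2] at ih ⊢
    have hlen : ((word.drop wi.toNat).length : Int) = (word.length : Int) - wi := by
      rw [List.length_drop]; omega
    by_cases hc : n ≤ ((word.drop wi.toNat).length : Int)
    · have hle2 : wi + n ≤ (word.length : Int) := by omega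
      rw [ih (by omega) hle2]
      have : (word.drop wi.toNat).drop n.toNat = word.drop (wi + n).toNat := by
        rw [List.drop_drop]
        congr 1
        omega
      rw [this, decide_eq_true hc, Bool.true_and]
    · rw [loopA_false word _ _ (by omega), decide_eq_false hc, Bool.false_and]
  | case4 c r wi hd hfail =>
    intro hnn hle
    have hA : loopA word (c :: r) wi = false := by
      rw [loopA, if_neg (by simpa using hd), if_pos hfail]
    have hB : matchB (word.drop wi.toNat) (c :: r) =
        ((!(word.drop wi.toNat).isEmpty) && ((word.drop wi.toNat).headD ' ' == c) &&
          matchB ((word.drop wi.toNat).drop 1) r) := by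
      rw [matchB, if_neg (by simpa using hd)]
    rw [hA, hB]
    by_cases hwl : wi < (word.length : Int)
    · have hlt : wi.toNat < word.length := by omega
      simp only [Bool.or_eq_true, decide_eq_true_eq, ge_iff_le] at hfail
      rcases hfail with h | h
      · omega
      · have hget : PySem.List.pyGet? word wi = word[wi.toNat]? := by
          conv_lhs => rw [show wi = ((wi.toNat : Nat) : Int) from by omega]
          exact PySem.List.pyGet?_natCast word wi.toNat
        have hhd : (word.drop wi.toNat).headD ' ' = word[wi.toNat] := by
          simp [List.headD_eq_head?, List.head?_drop, List.getElem?_eq_getElem hlt]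
        have hne : ¬ word[wi.toNat] = c := by
          intro hcontr
          rw [hget, List.getElem?_eq_getElem hlt, hcontr] at h
          simp at h
        have hbeq : ((word.drop wi.toNat).headD ' ' == c) = false := by
          rw [hhd]
          simpa using hne
        rw [hbeq, Bool.and_false, Bool.false_and]
    · have : (word.drop wi.toNat).isEmpty = true := by
        simp only [List.isEmpty_iff, List.drop_eq_nil_iff]
        omega
      simp [this]
  | case5 c r wi hd hfail ih =>
    intro hnn hle
    have hfail0 := hfail
    simp only [Bool.or_eq_true, decide_eq_true_eq, ge_iff_le, not_or, Bool.not_eq_true] at hfail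
    rcases hfail with ⟨h1, h2⟩
    have hwl : wi < (word.length : Int) := by push_neg at h1; exact h1
    have hlt : wi.toNat < word.length := by omega
    have hget : PySem.List.pyGet? word wi = word[wi.toNat]? := by
      conv_lhs => rw [show wi = ((wi.toNat : Nat) : Int) from by omega]
      exact PySem.List.pyGet?_natCast word wi.toNat
    have hc : word[wi.toNat] = c := by
      have h2' := h2
      rw [hget, List.getElem?_eq_getElem hlt] at h2'
      have : (!(some word[wi.toNat] == some c)) = false := h2'
      simp at this
      exact this
    have hA : loopA word (c :: r) wi = loopA word r (wi + 1) := by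
      rw [loopA, if_neg (by simpa using hd), if_neg hfail0]
    have hB : matchB (word.drop wi.toNat) (c :: r) =
        ((!(word.drop wi.toNat).isEmpty) && ((word.drop wi.toNat).headD ' ' == c) &&
          matchB ((word.drop wi.toNat).drop 1) r) := by
      rw [matchB, if_neg (by simpa using hd)]
    have hhd : (word.drop wi.toNat).headD ' ' = word[wi.toNat] := by
      simp [List.headD_eq_head?, List.head?_drop, List.getElem?_eq_getElem hlt]
    have hnonempty : (word.drop wi.toNat).isEmpty = false := by
      simp only [List.isEmpty_eq_false_iff, ne_eq, List.drop_eq_nil_iff]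
      omega
    have hdrop : (word.drop wi.toNat).drop 1 = word.drop (wi + 1).toNat := by
      rw [List.drop_drop]
      congr 1
      omega
    rw [hA, hB, ih (by omega) (by omega), hdrop, hnonempty, hhd, hc]
    simp

-- ===== VERDICT (by name: the statement is the Claim_ definition above) =====
theorem validWord_spec : Claim_equal_validWord := by
  intro word abbr _
  unfold Spec_validWord validWord validWord_alt
  split
  · rfl
  · simpa using loop_eq_match word.toList abbr.toList 0 le_rfl (by omega)
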